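-- pv_equiv track=rewrite | github.com/Uncle-Clyde/astrbot_plugin_qikan | astrbot_plugin_moniqikanyingxiongzhuan-main/game/map_system.py | get_player_bandit_rank
-- ===== SOURCE A (Python) =====
-- def get_player_bandit_rank(total_defeated: int) -> tuple[str, int, int]:
--     """
--     根据击败总数获取称号和下一级所需击败数。
--     返回: (称号, 当前级, 下一级所需)
--     """
--     ranks = [
--         (0, "新兵", 10),
--         (10, "士兵", 30),
--         (40, "老兵", 60),
--         (100, "骑士", 100),
--         (200, "骑士长", 150),
--         (350, "男爵", 200),
--         (550, "子爵", 300),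
--         (850, "伯爵", 400),
--         (1250, "侯爵", 500),
--         (1750, "公爵", 999999),
--         (2750, "领主"),
--     ]
--
--     for i, entry in enumerate(ranks):
--         count = entry[0]
--         name = entry[1]
--         if len(entry) > 2:
--             next_req = entry[2]
--         else:
--             next_req = 999999
--
--         if total_defeated < count:
--             prev_entry = ranks[i - 1]
--             return prev_entry[1], i, count - total_defeated
--
--         if i == len(ranks) - 1:
--             return name, i + 1, 999999
--
--     return "领主", len(ranks), 999999
-- ===== SOURCE B (Python) =====
-- def get_player_bandit_rank(total_defeated: int) -> tuple[str, int, int]: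
--     thresholds = [0, 10, 40, 100, 200, 350, 550, 850, 1250, 1750, 2750]
--     names = ["新兵", "士兵", "老兵", "骑士", "骑士长", "男爵", "子爵", "伯爵", "侯爵", "公爵", "领主"]
--     # binary search: lo = bisect_right(thresholds, total_defeated)
--     lo, hi = 0, len(thresholds)
--     while lo < hi:
--         mid = (lo + hi) // 2
--         if total_defeated < thresholds[mid]:
--             hi = mid
--         else:
--             lo = mid + 1
--     if lo == len(thresholds):
--         return ("领主", lo, 999999)
--     return (names[lo - 1], lo, thresholds[lo] - total_defeated)
-- ===== Notes on version B (the rewrite author's own statement) =====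
-- stated objective: idiomatic
-- what changed: Replaced the enumerate-loop over a heterogeneous rank table (with a dead next_req computation) by a binary search (bisect_right) over a sorted thresholds list with a parallel names list.
import Mathlib
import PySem

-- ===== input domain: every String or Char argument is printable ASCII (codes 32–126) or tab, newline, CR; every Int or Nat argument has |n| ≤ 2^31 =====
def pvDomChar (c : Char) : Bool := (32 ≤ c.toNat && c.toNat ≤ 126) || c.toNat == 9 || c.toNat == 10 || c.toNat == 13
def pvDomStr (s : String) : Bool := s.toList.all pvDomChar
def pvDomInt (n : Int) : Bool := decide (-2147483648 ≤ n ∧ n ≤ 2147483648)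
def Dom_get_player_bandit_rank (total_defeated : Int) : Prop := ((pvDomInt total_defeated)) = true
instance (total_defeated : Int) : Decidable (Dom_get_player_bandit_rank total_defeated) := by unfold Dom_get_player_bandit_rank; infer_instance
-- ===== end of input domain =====

-- B replaces A's linear enumerate-loop over a heterogeneous rank table by a binary search
-- (bisect_right) over a sorted thresholds list with a parallel names list (objective: idiomatic).

-- ===== PORT A =====
-- ranks table: (count, name, optional next_req) — the 11th entry has no third component
def pvRanksA : List (Int × String × Option Int) :=
  [(0, "新兵", some 10), (10, "士兵", some 30), (40, "老兵", some 60),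
   (100, "骑士", some 100), (200, "骑士长", some 150), (350, "男爵", some 200),
   (550, "子爵", some 300), (850, "伯爵", some 400), (1250, "侯爵", some 500),
   (1750, "公爵", some 999999), (2750, "领主", none)]

-- the for-loop over enumerate(ranks); i is the running index; ranks[i-1] uses Python indexing (wraps for i = 0)
def pvLoopA (total_defeated : Int) : List (Int × String × Option Int) → Nat → String × Int × Int
  | [], _ => ("领主", (pvRanksA.length : Int), 999999)
  | entry :: rest, i =>
    let count := entry.1
    let name := entry.2.1
    let _next_req : Int := match entry.2.2 with | some r => r | none => 999999  -- computed, never used (as in A)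
    if total_defeated < count then
      let prev_entry := (PySem.List.pyGet? pvRanksA ((i : Int) - 1)).getD (0, "", none)
      (prev_entry.2.1, (i : Int), count - total_defeated)
    else if i = pvRanksA.length - 1 then
      (name, (i : Int) + 1, 999999)
    else
      pvLoopA total_defeated rest (i + 1)

def get_player_bandit_rank (total_defeated : Int) : String × Int × Int :=
  pvLoopA total_defeated pvRanksA 0

-- ===== PORT B =====
def pvThresholds : List Int := [0, 10, 40, 100, 200, 350, 550, 850, 1250, 1750, 2750]
def pvNames : List String :=
  ["新兵", "士兵", "老兵", "骑士", "骑士长", "男爵", "子爵", "伯爵", "侯爵", "公爵", "领主"]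

-- the while lo < hi binary-search loop (bisect_right)
def pvBisect (total_defeated : Int) (lo hi : Nat) : Nat :=
  if lo < hi then
    let mid := (lo + hi) / 2
    if total_defeated < (PySem.List.pyGet? pvThresholds (mid : Int)).getD 0 then
      pvBisect total_defeated lo mid
    else
      pvBisect total_defeated (mid + 1) hi
  else lo
termination_by hi - lo
decreasing_by all_goals omega

def get_player_bandit_rank_alt (total_defeated : Int) : String × Int × Int :=
  let lo := pvBisect total_defeated 0 pvThresholds.length
  if lo = pvThresholds.length then
    ("领主", (lo : Int), 999999)
  else
    ((PySem.List.pyGet? pvNames ((lo : Int) - 1)).getD "", (lo : Int),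
     (PySem.List.pyGet? pvThresholds (lo : Int)).getD 0 - total_defeated)

-- ===== PRECONDITION & SPEC =====
def Spec_get_player_bandit_rank (total_defeated : Int) (out : String × Int × Int) : Prop := out = get_player_bandit_rank_alt total_defeated
instance (total_defeated : Int) (out : String × Int × Int) : Decidable (Spec_get_player_bandit_rank total_defeated out) := by unfold Spec_get_player_bandit_rank; infer_instance

-- ===== CLAIM (what is proved, stated in full; the proofs are below) =====
def Claim_equal_get_player_bandit_rank : Prop := ∀ (total_defeated : Int), Dom_get_player_bandit_rank total_defeated → Spec_get_player_bandit_rank total_defeated (get_player_bandit_rank total_defeated)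

-- ===== LEMMAS AND PROOFS =====
-- named suffixes of pvRanksA: keep region-lemma proof terms small
def pvS11 : List (Int × String × Option Int) := []
def pvS10 : List (Int × String × Option Int) := (2750, "领主", none) :: pvS11
def pvS9 : List (Int × String × Option Int) := (1750, "公爵", some 999999) :: pvS10
def pvS8 : List (Int × String × Option Int) := (1250, "侯爵", some 500) :: pvS9
def pvS7 : List (Int × String × Option Int) := (850, "伯爵", some 400) :: pvS8
def pvS6 : List (Int × String × Option Int) := (550, "子爵", some 300) :: pvS7
def pvS5 : List (Int × String × Option Int) := (350, "男爵", some 200) :: pvS6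
def pvS4 : List (Int × String × Option Int) := (200, "骑士长", some 150) :: pvS5
def pvS3 : List (Int × String × Option Int) := (100, "骑士", some 100) :: pvS4
def pvS2 : List (Int × String × Option Int) := (40, "老兵", some 60) :: pvS3
def pvS1 : List (Int × String × Option Int) := (10, "士兵", some 30) :: pvS2
def pvS0 : List (Int × String × Option Int) := (0, "新兵", some 10) :: pvS1
lemma pvRanksA_eqS : pvRanksA = pvS0 := rfl
lemma pvS0_eq : pvS0 = (0, "新兵", some 10) :: pvS1 := rfl
lemma pvS1_eq : pvS1 = (10, "士兵", some 30) :: pvS2 := rfl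
lemma pvS2_eq : pvS2 = (40, "老兵", some 60) :: pvS3 := rfl
lemma pvS3_eq : pvS3 = (100, "骑士", some 100) :: pvS4 := rfl
lemma pvS4_eq : pvS4 = (200, "骑士长", some 150) :: pvS5 := rfl
lemma pvS5_eq : pvS5 = (350, "男爵", some 200) :: pvS6 := rfl
lemma pvS6_eq : pvS6 = (550, "子爵", some 300) :: pvS7 := rfl
lemma pvS7_eq : pvS7 = (850, "伯爵", some 400) :: pvS8 := rfl
lemma pvS8_eq : pvS8 = (1250, "侯爵", some 500) :: pvS9 := rfl
lemma pvS9_eq : pvS9 = (1750, "公爵", some 999999) :: pvS10 := rfl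
lemma pvS10_eq : pvS10 = (2750, "领主", none) :: pvS11 := rfl

-- generic one-iteration lemmas for A's loop
lemma pvLoopA_step (t c : Int) (nm : String) (nr : Option Int)
    (rest : List (Int × String × Option Int)) (i : Nat)
    (h1 : ¬ t < c) (h2 : ¬ i = pvRanksA.length - 1) :
    pvLoopA t ((c, nm, nr) :: rest) i = pvLoopA t rest (i + 1) := by
  simp only [pvLoopA, if_neg h1, if_neg h2]

lemma pvLoopA_hit (t c : Int) (nm : String) (nr : Option Int)
    (rest : List (Int × String × Option Int)) (i : Nat) (h1 : t < c) :
    pvLoopA t ((c, nm, nr) :: rest) i =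
      (((PySem.List.pyGet? pvRanksA ((i : Int) - 1)).getD (0, "", none)).2.1, (i : Int), c - t) := by
  simp only [pvLoopA, if_pos h1]

lemma pvLoopA_last (t c : Int) (nm : String) (nr : Option Int)
    (rest : List (Int × String × Option Int)) (i : Nat)
    (h1 : ¬ t < c) (h2 : i = pvRanksA.length - 1) :
    pvLoopA t ((c, nm, nr) :: rest) i = (nm, (i : Int) + 1, 999999) := by
  simp only [pvLoopA, if_neg h1, if_pos h2]

lemma pvBisectR0 (t : Int) (h0 : t < 0) : pvBisect t 0 11 = 0 := by
  rw [pvBisect]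
  norm_num [show (PySem.List.pyGet? pvThresholds 5).getD 0 = 350 from by decide]
  rw [if_pos (by omega)]
  rw [pvBisect]
  norm_num [show (PySem.List.pyGet? pvThresholds 2).getD 0 = 40 from by decide]
  rw [if_pos (by omega)]
  rw [pvBisect]
  norm_num [show (PySem.List.pyGet? pvThresholds 1).getD 0 = 10 from by decide]
  rw [if_pos (by omega)]
  rw [pvBisect]
  norm_num [show (PySem.List.pyGet? pvThresholds 0).getD 0 = 0 from by decide]
  rw [if_pos (by omega)]
  rw [pvBisect]
  norm_num
lemma pvAR0 (t : Int) (h0 : t < 0) : get_player_bandit_rank t = ("领主", 0, 0 - t) := by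
  rw [get_player_bandit_rank, pvRanksA_eqS]
  rw [pvS0_eq, pvLoopA_hit t _ _ _ _ 0 (by omega)]
  norm_num [show ((PySem.List.pyGet? pvRanksA ((0 : Int) - 1)).getD (0, "", none)).2.1 = "领主" from by decide]
  try decide
lemma pvBR0 (t : Int) (h0 : t < 0) : get_player_bandit_rank_alt t = ("领主", 0, 0 - t) := by
  unfold get_player_bandit_rank_alt
  rw [show pvThresholds.length = 11 from rfl, pvBisectR0 t h0]
  norm_num [show (PySem.List.pyGet? pvNames ((0 : Int) - 1)).getD "" = "领主" from by decide,
    show (PySem.List.pyGet? pvThresholds (0 : Int)).getD 0 = 0 from by decide]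
  try decide
lemma pvBisectR1 (t : Int) (h0 : 0 ≤ t) (h1 : t < 10) : pvBisect t 0 11 = 1 := by
  rw [pvBisect]
  norm_num [show (PySem.List.pyGet? pvThresholds 5).getD 0 = 350 from by decide]
  rw [if_pos (by omega)]
  rw [pvBisect]
  norm_num [show (PySem.List.pyGet? pvThresholds 2).getD 0 = 40 from by decide]
  rw [if_pos (by omega)]
  rw [pvBisect]
  norm_num [show (PySem.List.pyGet? pvThresholds 1).getD 0 = 10 from by decide]
  rw [if_pos (by omega)]
  rw [pvBisect]
  norm_num [show (PySem.List.pyGet? pvThresholds 0).getD 0 = 0 from by decide]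
  rw [if_neg (by omega)]
  rw [pvBisect]
  norm_num
lemma pvAR1 (t : Int) (h0 : 0 ≤ t) (h1 : t < 10) : get_player_bandit_rank t = ("新兵", 1, 10 - t) := by
  rw [get_player_bandit_rank, pvRanksA_eqS]
  rw [pvS0_eq, pvLoopA_step t _ _ _ _ 0 (by omega) (by decide)]
  rw [pvS1_eq, pvLoopA_hit t _ _ _ _ 1 (by omega)]
  norm_num [show ((PySem.List.pyGet? pvRanksA ((1 : Int) - 1)).getD (0, "", none)).2.1 = "新兵" from by decide]
  try decide
lemma pvBR1 (t : Int) (h0 : 0 ≤ t) (h1 : t < 10) : get_player_bandit_rank_alt t = ("新兵", 1, 10 - t) := by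
  unfold get_player_bandit_rank_alt
  rw [show pvThresholds.length = 11 from rfl, pvBisectR1 t h0 h1]
  norm_num [show (PySem.List.pyGet? pvNames ((1 : Int) - 1)).getD "" = "新兵" from by decide,
    show (PySem.List.pyGet? pvThresholds (1 : Int)).getD 0 = 10 from by decide]
  try decide
lemma pvBisectR2 (t : Int) (h0 : 10 ≤ t) (h1 : t < 40) : pvBisect t 0 11 = 2 := by
  rw [pvBisect]
  norm_num [show (PySem.List.pyGet? pvThresholds 5).getD 0 = 350 from by decide]
  rw [if_pos (by omega)]
  rw [pvBisect]
  norm_num [show (PySem.List.pyGet? pvThresholds 2).getD 0 = 40 from by decide]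
  rw [if_pos (by omega)]
  rw [pvBisect]
  norm_num [show (PySem.List.pyGet? pvThresholds 1).getD 0 = 10 from by decide]
  rw [if_neg (by omega)]
  rw [pvBisect]
  norm_num
lemma pvAR2 (t : Int) (h0 : 10 ≤ t) (h1 : t < 40) : get_player_bandit_rank t = ("士兵", 2, 40 - t) := by
  rw [get_player_bandit_rank, pvRanksA_eqS]
  rw [pvS0_eq, pvLoopA_step t _ _ _ _ 0 (by omega) (by decide)]
  rw [pvS1_eq, pvLoopA_step t _ _ _ _ 1 (by omega) (by decide)]
  rw [pvS2_eq, pvLoopA_hit t _ _ _ _ 2 (by omega)]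
  norm_num [show ((PySem.List.pyGet? pvRanksA ((2 : Int) - 1)).getD (0, "", none)).2.1 = "士兵" from by decide]
  try decide
lemma pvBR2 (t : Int) (h0 : 10 ≤ t) (h1 : t < 40) : get_player_bandit_rank_alt t = ("士兵", 2, 40 - t) := by
  unfold get_player_bandit_rank_alt
  rw [show pvThresholds.length = 11 from rfl, pvBisectR2 t h0 h1]
  norm_num [show (PySem.List.pyGet? pvNames ((2 : Int) - 1)).getD "" = "士兵" from by decide,
    show (PySem.List.pyGet? pvThresholds (2 : Int)).getD 0 = 40 from by decide]
  try decide
lemma pvBisectR3 (t : Int) (h0 : 40 ≤ t) (h1 : t < 100) : pvBisect t 0 11 = 3 := by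
  rw [pvBisect]
  norm_num [show (PySem.List.pyGet? pvThresholds 5).getD 0 = 350 from by decide]
  rw [if_pos (by omega)]
  rw [pvBisect]
  norm_num [show (PySem.List.pyGet? pvThresholds 2).getD 0 = 40 from by decide]
  rw [if_neg (by omega)]
  rw [pvBisect]
  norm_num [show (PySem.List.pyGet? pvThresholds 4).getD 0 = 200 from by decide]
  rw [if_pos (by omega)]
  rw [pvBisect]
  norm_num [show (PySem.List.pyGet? pvThresholds 3).getD 0 = 100 from by decide]
  rw [if_pos (by omega)]
  rw [pvBisect]
  norm_num
lemma pvAR3 (t : Int) (h0 : 40 ≤ t) (h1 : t < 100) : get_player_bandit_rank t = ("老兵", 3, 100 - t) := by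
  rw [get_player_bandit_rank, pvRanksA_eqS]
  rw [pvS0_eq, pvLoopA_step t _ _ _ _ 0 (by omega) (by decide)]
  rw [pvS1_eq, pvLoopA_step t _ _ _ _ 1 (by omega) (by decide)]
  rw [pvS2_eq, pvLoopA_step t _ _ _ _ 2 (by omega) (by decide)]
  rw [pvS3_eq, pvLoopA_hit t _ _ _ _ 3 (by omega)]
  norm_num [show ((PySem.List.pyGet? pvRanksA ((3 : Int) - 1)).getD (0, "", none)).2.1 = "老兵" from by decide]
  try decide
lemma pvBR3 (t : Int) (h0 : 40 ≤ t) (h1 : t < 100) : get_player_bandit_rank_alt t = ("老兵", 3, 100 - t) := by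
  unfold get_player_bandit_rank_alt
  rw [show pvThresholds.length = 11 from rfl, pvBisectR3 t h0 h1]
  norm_num [show (PySem.List.pyGet? pvNames ((3 : Int) - 1)).getD "" = "老兵" from by decide,
    show (PySem.List.pyGet? pvThresholds (3 : Int)).getD 0 = 100 from by decide]
  try decide
lemma pvBisectR4 (t : Int) (h0 : 100 ≤ t) (h1 : t < 200) : pvBisect t 0 11 = 4 := by
  rw [pvBisect]
  norm_num [show (PySem.List.pyGet? pvThresholds 5).getD 0 = 350 from by decide]
  rw [if_pos (by omega)]
  rw [pvBisect]
  norm_num [show (PySem.List.pyGet? pvThresholds 2).getD 0 = 40 from by decide]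
  rw [if_neg (by omega)]
  rw [pvBisect]
  norm_num [show (PySem.List.pyGet? pvThresholds 4).getD 0 = 200 from by decide]
  rw [if_pos (by omega)]
  rw [pvBisect]
  norm_num [show (PySem.List.pyGet? pvThresholds 3).getD 0 = 100 from by decide]
  rw [if_neg (by omega)]
  rw [pvBisect]
  norm_num
lemma pvAR4 (t : Int) (h0 : 100 ≤ t) (h1 : t < 200) : get_player_bandit_rank t = ("骑士", 4, 200 - t) := by
  rw [get_player_bandit_rank, pvRanksA_eqS]
  rw [pvS0_eq, pvLoopA_step t _ _ _ _ 0 (by omega) (by decide)]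
  rw [pvS1_eq, pvLoopA_step t _ _ _ _ 1 (by omega) (by decide)]
  rw [pvS2_eq, pvLoopA_step t _ _ _ _ 2 (by omega) (by decide)]
  rw [pvS3_eq, pvLoopA_step t _ _ _ _ 3 (by omega) (by decide)]
  rw [pvS4_eq, pvLoopA_hit t _ _ _ _ 4 (by omega)]
  norm_num [show ((PySem.List.pyGet? pvRanksA ((4 : Int) - 1)).getD (0, "", none)).2.1 = "骑士" from by decide]
  try decide
lemma pvBR4 (t : Int) (h0 : 100 ≤ t) (h1 : t < 200) : get_player_bandit_rank_alt t = ("骑士", 4, 200 - t) := by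
  unfold get_player_bandit_rank_alt
  rw [show pvThresholds.length = 11 from rfl, pvBisectR4 t h0 h1]
  norm_num [show (PySem.List.pyGet? pvNames ((4 : Int) - 1)).getD "" = "骑士" from by decide,
    show (PySem.List.pyGet? pvThresholds (4 : Int)).getD 0 = 200 from by decide]
  try decide
lemma pvBisectR5 (t : Int) (h0 : 200 ≤ t) (h1 : t < 350) : pvBisect t 0 11 = 5 := by
  rw [pvBisect]
  norm_num [show (PySem.List.pyGet? pvThresholds 5).getD 0 = 350 from by decide]
  rw [if_pos (by omega)]
  rw [pvBisect]
  norm_num [show (PySem.List.pyGet? pvThresholds 2).getD 0 = 40 from by decide]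
  rw [if_neg (by omega)]
  rw [pvBisect]
  norm_num [show (PySem.List.pyGet? pvThresholds 4).getD 0 = 200 from by decide]
  rw [if_neg (by omega)]
  rw [pvBisect]
  norm_num
lemma pvAR5 (t : Int) (h0 : 200 ≤ t) (h1 : t < 350) : get_player_bandit_rank t = ("骑士长", 5, 350 - t) := by
  rw [get_player_bandit_rank, pvRanksA_eqS]
  rw [pvS0_eq, pvLoopA_step t _ _ _ _ 0 (by omega) (by decide)]
  rw [pvS1_eq, pvLoopA_step t _ _ _ _ 1 (by omega) (by decide)]
  rw [pvS2_eq, pvLoopA_step t _ _ _ _ 2 (by omega) (by decide)]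
  rw [pvS3_eq, pvLoopA_step t _ _ _ _ 3 (by omega) (by decide)]
  rw [pvS4_eq, pvLoopA_step t _ _ _ _ 4 (by omega) (by decide)]
  rw [pvS5_eq, pvLoopA_hit t _ _ _ _ 5 (by omega)]
  norm_num [show ((PySem.List.pyGet? pvRanksA ((5 : Int) - 1)).getD (0, "", none)).2.1 = "骑士长" from by decide]
  try decide
lemma pvBR5 (t : Int) (h0 : 200 ≤ t) (h1 : t < 350) : get_player_bandit_rank_alt t = ("骑士长", 5, 350 - t) := by
  unfold get_player_bandit_rank_alt
  rw [show pvThresholds.length = 11 from rfl, pvBisectR5 t h0 h1]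
  norm_num [show (PySem.List.pyGet? pvNames ((5 : Int) - 1)).getD "" = "骑士长" from by decide,
    show (PySem.List.pyGet? pvThresholds (5 : Int)).getD 0 = 350 from by decide]
  try decide
lemma pvBisectR6 (t : Int) (h0 : 350 ≤ t) (h1 : t < 550) : pvBisect t 0 11 = 6 := by
  rw [pvBisect]
  norm_num [show (PySem.List.pyGet? pvThresholds 5).getD 0 = 350 from by decide]
  rw [if_neg (by omega)]
  rw [pvBisect]
  norm_num [show (PySem.List.pyGet? pvThresholds 8).getD 0 = 1250 from by decide]
  rw [if_pos (by omega)]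
  rw [pvBisect]
  norm_num [show (PySem.List.pyGet? pvThresholds 7).getD 0 = 850 from by decide]
  rw [if_pos (by omega)]
  rw [pvBisect]
  norm_num [show (PySem.List.pyGet? pvThresholds 6).getD 0 = 550 from by decide]
  rw [if_pos (by omega)]
  rw [pvBisect]
  norm_num
lemma pvAR6 (t : Int) (h0 : 350 ≤ t) (h1 : t < 550) : get_player_bandit_rank t = ("男爵", 6, 550 - t) := by
  rw [get_player_bandit_rank, pvRanksA_eqS]
  rw [pvS0_eq, pvLoopA_step t _ _ _ _ 0 (by omega) (by decide)]
  rw [pvS1_eq, pvLoopA_step t _ _ _ _ 1 (by omega) (by decide)]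
  rw [pvS2_eq, pvLoopA_step t _ _ _ _ 2 (by omega) (by decide)]
  rw [pvS3_eq, pvLoopA_step t _ _ _ _ 3 (by omega) (by decide)]
  rw [pvS4_eq, pvLoopA_step t _ _ _ _ 4 (by omega) (by decide)]
  rw [pvS5_eq, pvLoopA_step t _ _ _ _ 5 (by omega) (by decide)]
  rw [pvS6_eq, pvLoopA_hit t _ _ _ _ 6 (by omega)]
  norm_num [show ((PySem.List.pyGet? pvRanksA ((6 : Int) - 1)).getD (0, "", none)).2.1 = "男爵" from by decide]
  try decide
lemma pvBR6 (t : Int) (h0 : 350 ≤ t) (h1 : t < 550) : get_player_bandit_rank_alt t = ("男爵", 6, 550 - t) := by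
  unfold get_player_bandit_rank_alt
  rw [show pvThresholds.length = 11 from rfl, pvBisectR6 t h0 h1]
  norm_num [show (PySem.List.pyGet? pvNames ((6 : Int) - 1)).getD "" = "男爵" from by decide,
    show (PySem.List.pyGet? pvThresholds (6 : Int)).getD 0 = 550 from by decide]
  try decide
lemma pvBisectR7 (t : Int) (h0 : 550 ≤ t) (h1 : t < 850) : pvBisect t 0 11 = 7 := by
  rw [pvBisect]
  norm_num [show (PySem.List.pyGet? pvThresholds 5).getD 0 = 350 from by decide]
  rw [if_neg (by omega)]
  rw [pvBisect]
  norm_num [show (PySem.List.pyGet? pvThresholds 8).getD 0 = 1250 from by decide]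
  rw [if_pos (by omega)]
  rw [pvBisect]
  norm_num [show (PySem.List.pyGet? pvThresholds 7).getD 0 = 850 from by decide]
  rw [if_pos (by omega)]
  rw [pvBisect]
  norm_num [show (PySem.List.pyGet? pvThresholds 6).getD 0 = 550 from by decide]
  rw [if_neg (by omega)]
  rw [pvBisect]
  norm_num
lemma pvAR7 (t : Int) (h0 : 550 ≤ t) (h1 : t < 850) : get_player_bandit_rank t = ("子爵", 7, 850 - t) := by
  rw [get_player_bandit_rank, pvRanksA_eqS]
  rw [pvS0_eq, pvLoopA_step t _ _ _ _ 0 (by omega) (by decide)]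
  rw [pvS1_eq, pvLoopA_step t _ _ _ _ 1 (by omega) (by decide)]
  rw [pvS2_eq, pvLoopA_step t _ _ _ _ 2 (by omega) (by decide)]
  rw [pvS3_eq, pvLoopA_step t _ _ _ _ 3 (by omega) (by decide)]
  rw [pvS4_eq, pvLoopA_step t _ _ _ _ 4 (by omega) (by decide)]
  rw [pvS5_eq, pvLoopA_step t _ _ _ _ 5 (by omega) (by decide)]
  rw [pvS6_eq, pvLoopA_step t _ _ _ _ 6 (by omega) (by decide)]
  rw [pvS7_eq, pvLoopA_hit t _ _ _ _ 7 (by omega)]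
  norm_num [show ((PySem.List.pyGet? pvRanksA ((7 : Int) - 1)).getD (0, "", none)).2.1 = "子爵" from by decide]
  try decide
lemma pvBR7 (t : Int) (h0 : 550 ≤ t) (h1 : t < 850) : get_player_bandit_rank_alt t = ("子爵", 7, 850 - t) := by
  unfold get_player_bandit_rank_alt
  rw [show pvThresholds.length = 11 from rfl, pvBisectR7 t h0 h1]
  norm_num [show (PySem.List.pyGet? pvNames ((7 : Int) - 1)).getD "" = "子爵" from by decide,
    show (PySem.List.pyGet? pvThresholds (7 : Int)).getD 0 = 850 from by decide]
  try decide
lemma pvBisectR8 (t : Int) (h0 : 850 ≤ t) (h1 : t < 1250) : pvBisect t 0 11 = 8 := by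
  rw [pvBisect]
  norm_num [show (PySem.List.pyGet? pvThresholds 5).getD 0 = 350 from by decide]
  rw [if_neg (by omega)]
  rw [pvBisect]
  norm_num [show (PySem.List.pyGet? pvThresholds 8).getD 0 = 1250 from by decide]
  rw [if_pos (by omega)]
  rw [pvBisect]
  norm_num [show (PySem.List.pyGet? pvThresholds 7).getD 0 = 850 from by decide]
  rw [if_neg (by omega)]
  rw [pvBisect]
  norm_num
lemma pvAR8 (t : Int) (h0 : 850 ≤ t) (h1 : t < 1250) : get_player_bandit_rank t = ("伯爵", 8, 1250 - t) := by
  rw [get_player_bandit_rank, pvRanksA_eqS]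
  rw [pvS0_eq, pvLoopA_step t _ _ _ _ 0 (by omega) (by decide)]
  rw [pvS1_eq, pvLoopA_step t _ _ _ _ 1 (by omega) (by decide)]
  rw [pvS2_eq, pvLoopA_step t _ _ _ _ 2 (by omega) (by decide)]
  rw [pvS3_eq, pvLoopA_step t _ _ _ _ 3 (by omega) (by decide)]
  rw [pvS4_eq, pvLoopA_step t _ _ _ _ 4 (by omega) (by decide)]
  rw [pvS5_eq, pvLoopA_step t _ _ _ _ 5 (by omega) (by decide)]
  rw [pvS6_eq, pvLoopA_step t _ _ _ _ 6 (by omega) (by decide)]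
  rw [pvS7_eq, pvLoopA_step t _ _ _ _ 7 (by omega) (by decide)]
  rw [pvS8_eq, pvLoopA_hit t _ _ _ _ 8 (by omega)]
  norm_num [show ((PySem.List.pyGet? pvRanksA ((8 : Int) - 1)).getD (0, "", none)).2.1 = "伯爵" from by decide]
  try decide
lemma pvBR8 (t : Int) (h0 : 850 ≤ t) (h1 : t < 1250) : get_player_bandit_rank_alt t = ("伯爵", 8, 1250 - t) := by
  unfold get_player_bandit_rank_alt
  rw [show pvThresholds.length = 11 from rfl, pvBisectR8 t h0 h1]
  norm_num [show (PySem.List.pyGet? pvNames ((8 : Int) - 1)).getD "" = "伯爵" from by decide,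
    show (PySem.List.pyGet? pvThresholds (8 : Int)).getD 0 = 1250 from by decide]
  try decide
lemma pvBisectR9 (t : Int) (h0 : 1250 ≤ t) (h1 : t < 1750) : pvBisect t 0 11 = 9 := by
  rw [pvBisect]
  norm_num [show (PySem.List.pyGet? pvThresholds 5).getD 0 = 350 from by decide]
  rw [if_neg (by omega)]
  rw [pvBisect]
  norm_num [show (PySem.List.pyGet? pvThresholds 8).getD 0 = 1250 from by decide]
  rw [if_neg (by omega)]
  rw [pvBisect]
  norm_num [show (PySem.List.pyGet? pvThresholds 10).getD 0 = 2750 from by decide]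
  rw [if_pos (by omega)]
  rw [pvBisect]
  norm_num [show (PySem.List.pyGet? pvThresholds 9).getD 0 = 1750 from by decide]
  rw [if_pos (by omega)]
  rw [pvBisect]
  norm_num
lemma pvAR9 (t : Int) (h0 : 1250 ≤ t) (h1 : t < 1750) : get_player_bandit_rank t = ("侯爵", 9, 1750 - t) := by
  rw [get_player_bandit_rank, pvRanksA_eqS]
  rw [pvS0_eq, pvLoopA_step t _ _ _ _ 0 (by omega) (by decide)]
  rw [pvS1_eq, pvLoopA_step t _ _ _ _ 1 (by omega) (by decide)]
  rw [pvS2_eq, pvLoopA_step t _ _ _ _ 2 (by omega) (by decide)]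
  rw [pvS3_eq, pvLoopA_step t _ _ _ _ 3 (by omega) (by decide)]
  rw [pvS4_eq, pvLoopA_step t _ _ _ _ 4 (by omega) (by decide)]
  rw [pvS5_eq, pvLoopA_step t _ _ _ _ 5 (by omega) (by decide)]
  rw [pvS6_eq, pvLoopA_step t _ _ _ _ 6 (by omega) (by decide)]
  rw [pvS7_eq, pvLoopA_step t _ _ _ _ 7 (by omega) (by decide)]
  rw [pvS8_eq, pvLoopA_step t _ _ _ _ 8 (by omega) (by decide)]
  rw [pvS9_eq, pvLoopA_hit t _ _ _ _ 9 (by omega)]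
  norm_num [show ((PySem.List.pyGet? pvRanksA ((9 : Int) - 1)).getD (0, "", none)).2.1 = "侯爵" from by decide]
  try decide
lemma pvBR9 (t : Int) (h0 : 1250 ≤ t) (h1 : t < 1750) : get_player_bandit_rank_alt t = ("侯爵", 9, 1750 - t) := by
  unfold get_player_bandit_rank_alt
  rw [show pvThresholds.length = 11 from rfl, pvBisectR9 t h0 h1]
  norm_num [show (PySem.List.pyGet? pvNames ((9 : Int) - 1)).getD "" = "侯爵" from by decide,
    show (PySem.List.pyGet? pvThresholds (9 : Int)).getD 0 = 1750 from by decide]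
  try decide
lemma pvBisectR10 (t : Int) (h0 : 1750 ≤ t) (h1 : t < 2750) : pvBisect t 0 11 = 10 := by
  rw [pvBisect]
  norm_num [show (PySem.List.pyGet? pvThresholds 5).getD 0 = 350 from by decide]
  rw [if_neg (by omega)]
  rw [pvBisect]
  norm_num [show (PySem.List.pyGet? pvThresholds 8).getD 0 = 1250 from by decide]
  rw [if_neg (by omega)]
  rw [pvBisect]
  norm_num [show (PySem.List.pyGet? pvThresholds 10).getD 0 = 2750 from by decide]
  rw [if_pos (by omega)]
  rw [pvBisect]
  norm_num [show (PySem.List.pyGet? pvThresholds 9).getD 0 = 1750 from by decide]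
  rw [if_neg (by omega)]
  rw [pvBisect]
  norm_num
lemma pvAR10 (t : Int) (h0 : 1750 ≤ t) (h1 : t < 2750) : get_player_bandit_rank t = ("公爵", 10, 2750 - t) := by
  rw [get_player_bandit_rank, pvRanksA_eqS]
  rw [pvS0_eq, pvLoopA_step t _ _ _ _ 0 (by omega) (by decide)]
  rw [pvS1_eq, pvLoopA_step t _ _ _ _ 1 (by omega) (by decide)]
  rw [pvS2_eq, pvLoopA_step t _ _ _ _ 2 (by omega) (by decide)]
  rw [pvS3_eq, pvLoopA_step t _ _ _ _ 3 (by omega) (by decide)]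
  rw [pvS4_eq, pvLoopA_step t _ _ _ _ 4 (by omega) (by decide)]
  rw [pvS5_eq, pvLoopA_step t _ _ _ _ 5 (by omega) (by decide)]
  rw [pvS6_eq, pvLoopA_step t _ _ _ _ 6 (by omega) (by decide)]
  rw [pvS7_eq, pvLoopA_step t _ _ _ _ 7 (by omega) (by decide)]
  rw [pvS8_eq, pvLoopA_step t _ _ _ _ 8 (by omega) (by decide)]
  rw [pvS9_eq, pvLoopA_step t _ _ _ _ 9 (by omega) (by decide)]
  rw [pvS10_eq, pvLoopA_hit t _ _ _ _ 10 (by omega)]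
  norm_num [show ((PySem.List.pyGet? pvRanksA ((10 : Int) - 1)).getD (0, "", none)).2.1 = "公爵" from by decide]
  try decide
lemma pvBR10 (t : Int) (h0 : 1750 ≤ t) (h1 : t < 2750) : get_player_bandit_rank_alt t = ("公爵", 10, 2750 - t) := by
  unfold get_player_bandit_rank_alt
  rw [show pvThresholds.length = 11 from rfl, pvBisectR10 t h0 h1]
  norm_num [show (PySem.List.pyGet? pvNames ((10 : Int) - 1)).getD "" = "公爵" from by decide,
    show (PySem.List.pyGet? pvThresholds (10 : Int)).getD 0 = 2750 from by decide]
  try decide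
lemma pvBisectR11 (t : Int) (h0 : 2750 ≤ t) : pvBisect t 0 11 = 11 := by
  rw [pvBisect]
  norm_num [show (PySem.List.pyGet? pvThresholds 5).getD 0 = 350 from by decide]
  rw [if_neg (by omega)]
  rw [pvBisect]
  norm_num [show (PySem.List.pyGet? pvThresholds 8).getD 0 = 1250 from by decide]
  rw [if_neg (by omega)]
  rw [pvBisect]
  norm_num [show (PySem.List.pyGet? pvThresholds 10).getD 0 = 2750 from by decide]
  rw [if_neg (by omega)]
  rw [pvBisect]
  norm_num
lemma pvAR11 (t : Int) (h0 : 2750 ≤ t) : get_player_bandit_rank t = ("领主", 11, 999999) := by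
  rw [get_player_bandit_rank, pvRanksA_eqS]
  rw [pvS0_eq, pvLoopA_step t _ _ _ _ 0 (by omega) (by decide)]
  rw [pvS1_eq, pvLoopA_step t _ _ _ _ 1 (by omega) (by decide)]
  rw [pvS2_eq, pvLoopA_step t _ _ _ _ 2 (by omega) (by decide)]
  rw [pvS3_eq, pvLoopA_step t _ _ _ _ 3 (by omega) (by decide)]
  rw [pvS4_eq, pvLoopA_step t _ _ _ _ 4 (by omega) (by decide)]
  rw [pvS5_eq, pvLoopA_step t _ _ _ _ 5 (by omega) (by decide)]
  rw [pvS6_eq, pvLoopA_step t _ _ _ _ 6 (by omega) (by decide)]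
  rw [pvS7_eq, pvLoopA_step t _ _ _ _ 7 (by omega) (by decide)]
  rw [pvS8_eq, pvLoopA_step t _ _ _ _ 8 (by omega) (by decide)]
  rw [pvS9_eq, pvLoopA_step t _ _ _ _ 9 (by omega) (by decide)]
  rw [pvS10_eq, pvLoopA_last t _ _ _ _ 10 (by omega) (by decide)]
  norm_num
lemma pvBR11 (t : Int) (h0 : 2750 ≤ t) : get_player_bandit_rank_alt t = ("领主", 11, 999999) := by
  unfold get_player_bandit_rank_alt
  rw [show pvThresholds.length = 11 from rfl, pvBisectR11 t h0]
  norm_num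

-- ===== VERDICT (by name: the statement is the Claim_ definition above) =====
theorem get_player_bandit_rank_spec : Claim_equal_get_player_bandit_rank := by
  intro t _
  unfold Spec_get_player_bandit_rank
  rcases lt_or_ge t 0 with h | h0
  · rw [pvAR0 t h, pvBR0 t h]
  rcases lt_or_ge t 10 with h | h1
  · rw [pvAR1 t h0 h, pvBR1 t h0 h]
  rcases lt_or_ge t 40 with h | h2
  · rw [pvAR2 t h1 h, pvBR2 t h1 h]
  rcases lt_or_ge t 100 with h | h3
  · rw [pvAR3 t h2 h, pvBR3 t h2 h]
  rcases lt_or_ge t 200 with h | h4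
  · rw [pvAR4 t h3 h, pvBR4 t h3 h]
  rcases lt_or_ge t 350 with h | h5
  · rw [pvAR5 t h4 h, pvBR5 t h4 h]
  rcases lt_or_ge t 550 with h | h6
  · rw [pvAR6 t h5 h, pvBR6 t h5 h]
  rcases lt_or_ge t 850 with h | h7
  · rw [pvAR7 t h6 h, pvBR7 t h6 h]
  rcases lt_or_ge t 1250 with h | h8
  · rw [pvAR8 t h7 h, pvBR8 t h7 h]
  rcases lt_or_ge t 1750 with h | h9
  · rw [pvAR9 t h8 h, pvBR9 t h8 h]
  rcases lt_or_ge t 2750 with h | h10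
  · rw [pvAR10 t h9 h, pvBR10 t h9 h]
  rw [pvAR11 t h10, pvBR11 t h10]
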